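-- pv_equiv track=rewrite | github.com/OxQuasar/nous-memories | iching/spaceprobe/doubles/s4_derivation_test.py | all_fpf_involutions
-- ===== SOURCE A (Python) =====
-- def all_fpf_involutions(n=8):
--     """Generate all fixed-point-free involutions on {0,...,n-1}."""
--     # Build by choosing pairs: pick smallest unpaired, pair it with each option
--     invols = []
--     def backtrack(perm, unpaired):
--         if not unpaired:
--             invols.append(tuple(perm))
--             return
--         first = min(unpaired)
--         remaining = unpaired - {first}
--         for partner in sorted(remaining):
--             perm[first] = partner
--             perm[partner] = first
--             backtrack(perm, remaining - {partner})
--             perm[first] = first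
--             perm[partner] = partner
--
--     perm = list(range(n))
--     backtrack(perm, set(range(n)))
--     return invols
-- ===== SOURCE B (Python) =====
-- def all_fpf_involutions(n=8):
--     """Generate all fixed-point-free involutions on {0,...,n-1}."""
--     # Return-based recursion over the sorted unpaired elements: rec returns a
--     # list of matchings (lists of (first, partner) pairs); no shared mutation.
--     def rec(elems):
--         if not elems:
--             return [[]]
--         first, rest = elems[0], elems[1:]
--         out = []
--         for partner in rest:
--             sub = [x for x in rest if x != partner]
--             for m in rec(sub):
--                 out.append([(first, partner)] + m)
--         return out
--
--     result = []
--     for matching in rec(list(range(n))):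
--         perm = list(range(n))
--         for a, b in matching:
--             perm[a] = b
--             perm[b] = a
--         result.append(tuple(perm))
--     return result
-- ===== Notes on version B (the rewrite author's own statement) =====
-- stated objective: alternative
-- what changed: Replaced the shared-mutation backtracker (in-place perm updates/undo plus appending to a closed-over result list) by a pure return-based recursion that returns lists of (first,partner) matchings over the unpaired elements, with the permutation tuples filled in afterwards.
import Mathlib
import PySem

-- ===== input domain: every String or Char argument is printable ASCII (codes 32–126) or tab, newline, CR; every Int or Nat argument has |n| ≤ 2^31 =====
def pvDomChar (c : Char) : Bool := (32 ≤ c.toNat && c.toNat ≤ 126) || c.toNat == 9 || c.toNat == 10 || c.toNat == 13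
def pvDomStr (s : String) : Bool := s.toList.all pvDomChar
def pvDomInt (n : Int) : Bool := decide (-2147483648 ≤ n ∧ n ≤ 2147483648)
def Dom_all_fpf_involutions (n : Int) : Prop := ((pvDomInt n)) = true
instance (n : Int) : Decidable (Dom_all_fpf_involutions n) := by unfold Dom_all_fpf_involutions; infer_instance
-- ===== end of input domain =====

-- ===== PORT A =====
-- Transliteration of A's backtracking with an explicitly threaded (perm, invols)
-- state; perm[i] = v with i always a valid nonneg index is PySem.List.pySetD.
def pvBacktrackA (perm : List Int) (unpaired : PySem.Set Int) (invols : List (List Int)) :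
    List Int × List (List Int) :=
  if unpaired = [] then
    (perm, invols ++ [perm])
  else
    match PySem.List.min? unpaired (fun x => x) with
    | none => (perm, invols)  -- unreachable: min(unpaired) with unpaired nonempty
    | some first =>
      let remaining := PySem.Set.diff unpaired [first]
      (PySem.List.sorted remaining (fun x => x)).attach.foldl
        (fun st pp =>
          let perm1 := PySem.List.pySetD st.1 first pp.1
          let perm2 := PySem.List.pySetD perm1 pp.1 first
          let st' := pvBacktrackA perm2 (PySem.Set.diff remaining [pp.1]) st.2
          let perm3 := PySem.List.pySetD st'.1 first first
          (PySem.List.pySetD perm3 pp.1 pp.1, st'.2))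
        (perm, invols)
termination_by unpaired.length
decreasing_by
  have hmem : pp.1 ∈ remaining := (PySem.List.mem_sorted remaining _ _ _).mp pp.2
  calc (PySem.Set.diff remaining [pp.1]).length
      < remaining.length := by
        apply List.length_filter_lt_length_iff_exists.mpr
        exact ⟨pp.1, hmem, by simp⟩
    _ ≤ unpaired.length := List.length_filter_le _ _

def all_fpf_involutions (n : Int) : List (List Int) :=
  let perm := PySem.List.pyRange 0 n 1
  (pvBacktrackA perm (PySem.Set.ofList perm) []).2

-- ===== PORT B =====
-- rec: returns all matchings (lists of (first, partner) pairs) on elems.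
def pvRec (elems : List Int) : List (List (Int × Int)) :=
  match elems with
  | [] => [[]]
  | first :: rest =>
    rest.attach.foldl
      (fun out pp =>
        let sub := rest.filter (fun x => x != pp.1)
        out ++ (pvRec sub).map (fun m => [(first, pp.1)] ++ m))
      []
termination_by elems.length
decreasing_by
  simp only [List.length_unattach]
  exact Nat.lt_succ_of_le (le_trans (List.length_filter_le _ _) (by simp))

-- the fill-in loop: perm[a] = b; perm[b] = a over the matching
def pvApply (matching : List (Int × Int)) (perm : List Int) : List Int :=
  matching.foldl
    (fun p ab => PySem.List.pySetD (PySem.List.pySetD p ab.1 ab.2) ab.2 ab.1) perm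

def all_fpf_involutions_alt (n : Int) : List (List Int) :=
  (pvRec (PySem.List.pyRange 0 n 1)).foldl
    (fun result matching => result ++ [pvApply matching (PySem.List.pyRange 0 n 1)]) []

-- ===== PRECONDITION & SPEC =====
def Spec_all_fpf_involutions (n : Int) (out : List (List Int)) : Prop := out = all_fpf_involutions_alt n
instance (n : Int) (out : List (List Int)) : Decidable (Spec_all_fpf_involutions n out) := by unfold Spec_all_fpf_involutions; infer_instance

-- ===== CLAIM (what is proved, stated in full; the proofs are below) =====
def Claim_equal_all_fpf_involutions : Prop := ∀ (n : Int), Dom_all_fpf_involutions n → Spec_all_fpf_involutions n (all_fpf_involutions n)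

-- ===== LEMMAS AND PROOFS =====

-- Python set difference with a singleton is an ordinary filter
lemma pv_diff_single (l : List Int) (p : Int) :
    PySem.Set.diff l [p] = l.filter (fun x => x != p) := by
  simp only [PySem.Set.diff]
  apply List.filter_congr
  intro x _
  by_cases h : x = p <;> simp [h, PySem.Set.contains]

-- min over a strictly increasing nonempty list is its head
lemma pv_min_head (a : Int) (t : List Int) (h : (a :: t).Pairwise (· < ·)) :
    PySem.List.min? (a :: t) (fun x => x) = some a := by
  cases hm : PySem.List.min? (a :: t) (fun x => x) with
  | none => exact absurd ((PySem.List.min?_eq_none_iff _ _).mp hm) (by simp)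
  | some m =>
    have hmem := PySem.List.min?_mem hm
    have hmin := PySem.List.min?_isMin hm a (by simp)
    rcases List.mem_cons.mp hmem with rfl | hmt
    · rfl
    · have : a < m := (List.pairwise_cons.mp h).1 m hmt
      omega

-- undoing the two in-place writes restores the original list
lemma pv_set_restore (perm : List Int) (F P : Nat) (x y : Int)
    (hne : F ≠ P) (hF : F < perm.length) (hP : P < perm.length) :
    ((((perm.set F x).set P y).set F perm[F]).set P perm[P]) = perm := by
  rw [List.set_comm x y hne, List.set_set, List.set_comm y (perm[F]) (Ne.symm hne),
    List.set_getElem_self, List.set_set, List.set_getElem_self]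

-- invariant: every unpaired element is a valid self-mapped index of perm
def pvGood (perm : List Int) (l : List Int) : Prop :=
  ∀ x ∈ l, 0 ≤ x ∧ x.toNat < perm.length ∧ perm[x.toNat]? = some x

-- the inner partner loop of A equals the corresponding flatMap of B's blocks
lemma pv_fold_eq (M : Nat)
    (IH : ∀ l : List Int, l.length ≤ M → l.Pairwise (· < ·) →
      ∀ perm invols, pvGood perm l →
      pvBacktrackA perm l invols =
        (perm, invols ++ (pvRec l).map (fun m => pvApply m perm)))
    (a : Int) (t : List Int) (hpw : (a :: t).Pairwise (· < ·)) (htlen : t.length ≤ M)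
    (perm : List Int) (hgood : pvGood perm (a :: t)) :
    ∀ ps : List Int, (∀ p ∈ ps, p ∈ t) → ∀ invols,
    ps.foldl
      (fun st p =>
        (PySem.List.pySetD (PySem.List.pySetD
            (pvBacktrackA (PySem.List.pySetD (PySem.List.pySetD st.1 a p) p a)
              (PySem.Set.diff t [p]) st.2).1 a a) p p,
         (pvBacktrackA (PySem.List.pySetD (PySem.List.pySetD st.1 a p) p a)
            (PySem.Set.diff t [p]) st.2).2)) (perm, invols)
    = (perm, invols ++ ps.flatMap (fun p =>
        (pvRec (t.filter (fun x => x != p))).map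
          (fun m => pvApply m (PySem.List.pySetD (PySem.List.pySetD perm a p) p a)))) := by
  intro ps
  induction ps with
  | nil => intro _ invols; simp
  | cons p ps' ihp =>
    intro hps invols
    have hpt : p ∈ t := hps p (List.mem_cons_self ..)
    obtain ⟨ha0, haL, haV⟩ := hgood a (List.mem_cons_self ..)
    obtain ⟨hp0, hpL, hpV⟩ := hgood p (List.mem_cons_of_mem _ hpt)
    have hat : ∀ x ∈ t, a < x := (List.pairwise_cons.mp hpw).1
    have hpwt : t.Pairwise (· < ·) := (List.pairwise_cons.mp hpw).2
    have hap : a < p := hat p hpt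
    have hAP : a.toNat ≠ p.toNat := by omega
    have haE : perm[a.toNat] = a := by
      have := haV; rwa [List.getElem?_eq_getElem haL, Option.some_inj] at this
    have hpE : perm[p.toNat] = p := by
      have := hpV; rwa [List.getElem?_eq_getElem hpL, Option.some_inj] at this
    rw [List.foldl_cons]
    have hstep :
        ((PySem.List.pySetD (PySem.List.pySetD (pvBacktrackA (PySem.List.pySetD (PySem.List.pySetD (perm, invols).1 a p) p a) (PySem.Set.diff t [p]) (perm, invols).2).1 a a) p p, (pvBacktrackA (PySem.List.pySetD (PySem.List.pySetD (perm, invols).1 a p) p a) (PySem.Set.diff t [p]) (perm, invols).2).2)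
          : List Int × List (List Int))
        = (perm, invols ++ (pvRec (t.filter (fun x => x != p))).map
            (fun m => pvApply m (PySem.List.pySetD (PySem.List.pySetD perm a p) p a))) := by
      simp only [pv_diff_single]
      simp only [PySem.List.pySetD_of_nonneg _ _ ha0, PySem.List.pySetD_of_nonneg _ _ hp0]
      have hrec := IH (t.filter (fun x => x != p))
        (le_trans (List.length_filter_le _ _) htlen)
        (hpwt.filter _)
        ((perm.set a.toNat p).set p.toNat a) invols
        (by
          intro x hx
          have hxt : x ∈ t := List.mem_of_mem_filter hx
          have hxp : x ≠ p := by simpa using (List.of_mem_filter hx)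
          have hxa : a < x := hat x hxt
          obtain ⟨hx0, hxL, hxV⟩ := hgood x (List.mem_cons_of_mem _ hxt)
          refine ⟨hx0, by simpa using hxL, ?_⟩
          rw [List.getElem?_set_ne (by omega), List.getElem?_set_ne (by omega)]
          exact hxV)
      simp only [hrec]
      have hrestore :
          ((((perm.set a.toNat p).set p.toNat a).set a.toNat a).set p.toNat p) = perm := by
        have h := pv_set_restore perm a.toNat p.toNat p a hAP haL hpL
        rwa [haE, hpE] at h
      simp only [hrestore]
    rw [hstep, ihp (fun q hq => hps q (List.mem_cons_of_mem _ hq))]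
    simp [List.flatMap_cons, List.append_assoc]

lemma pv_backtrack_eq (N : Nat) :
    ∀ l : List Int, l.length ≤ N → l.Pairwise (· < ·) →
    ∀ perm invols, pvGood perm l →
    pvBacktrackA perm l invols =
      (perm, invols ++ (pvRec l).map (fun m => pvApply m perm)) := by
  induction N with
  | zero =>
    intro l hl _ perm invols _
    have : l = [] := List.length_eq_zero_iff.mp (Nat.le_zero.mp hl)
    subst this
    simp [pvBacktrackA, pvRec, pvApply]
  | succ M IH =>
    intro l hl hpw perm invols hgood
    match l with
    | [] => simp [pvBacktrackA, pvRec, pvApply]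
    | a :: t =>
      have hat : ∀ x ∈ t, a < x := (List.pairwise_cons.mp hpw).1
      have hpwt : t.Pairwise (· < ·) := (List.pairwise_cons.mp hpw).2
      have htlen : t.length ≤ M := by simpa using hl
      -- unfold one step of A
      rw [pvBacktrackA.eq_def]
      rw [if_neg (by simp)]
      rw [pv_min_head a t hpw]
      have hrem : PySem.Set.diff (a :: t) [a] = t := by
        rw [pv_diff_single, List.filter_cons]
        simp only [bne_self_eq_false, Bool.false_eq_true, if_false]
        exact List.filter_eq_self.mpr (fun x hx => by
          have := hat x hx; simp; omega)
      have hsort : PySem.List.sorted t (fun x => x) = t :=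
        PySem.List.sorted_eq_self_of_pairwise _ _ (hpwt.imp le_of_lt)
      simp only [hrem]
      rw [List.foldl_attach (f := (fun (st : List Int × List (List Int)) (p : Int) => (PySem.List.pySetD (PySem.List.pySetD (pvBacktrackA (PySem.List.pySetD (PySem.List.pySetD st.1 a p) p a) (PySem.Set.diff t [p]) st.2).1 a a) p p, (pvBacktrackA (PySem.List.pySetD (PySem.List.pySetD st.1 a p) p a) (PySem.Set.diff t [p]) st.2).2)))]
      rw [hrem, hsort]
      rw [pv_fold_eq M IH a t hpw htlen perm hgood t (fun _ hp => hp) invols]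
      -- unfold one step of B
      rw [pvRec.eq_2, List.foldl_attach (f := fun (out : List (List (Int × Int))) (p : Int) => out ++ (pvRec (List.filter (fun x => x != p) t)).map (fun m => [(a, p)] ++ m)),
        PySem.List.foldl_append_eq_flatMap (fun p => (pvRec (List.filter (fun x => x != p) t)).map (fun m => [(a, p)] ++ m))]
      simp only [List.map_flatMap, List.nil_append]
      congr 2
      congr 1
      funext p
      rw [List.map_map]
      apply List.map_congr_left
      intro m _
      simp [pvApply, Function.comp, List.foldl_cons]

lemma pv_range_repr (n : Int) :
    PySem.List.pyRange 0 n 1 = List.map (fun k : Nat => (k : Int)) (List.range n.toNat) := by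
  rcases le_or_gt 0 n with h | h
  · have := PySem.List.pyRange_zero_natCast n.toNat
    rwa [Int.toNat_of_nonneg h] at this
  · have h0 : n.toNat = 0 := by omega
    rw [h0]
    simp [PySem.List.pyRange]
    omega

theorem pv_top (n : Int) : all_fpf_involutions n = all_fpf_involutions_alt n := by
  have hpw : (PySem.List.pyRange 0 n 1).Pairwise (· < ·) := by
    rw [pv_range_repr n, List.pairwise_map]
    exact List.pairwise_lt_range.imp (fun h => by exact_mod_cast h)
  have hgood : pvGood (PySem.List.pyRange 0 n 1) (PySem.List.pyRange 0 n 1) := by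
    intro x hx
    rw [pv_range_repr n] at hx ⊢
    obtain ⟨k, hk, rfl⟩ := List.mem_map.mp hx
    have hkn : k < n.toNat := List.mem_range.mp hk
    refine ⟨by positivity, by simpa using hkn, ?_⟩
    simp [hkn]
  have hofl : PySem.Set.ofList (PySem.List.pyRange 0 n 1) = PySem.List.pyRange 0 n 1 :=
    PySem.Set.ofList_eq_self_of_nodup _ (hpw.imp (fun h => ne_of_lt h))
  show (pvBacktrackA (PySem.List.pyRange 0 n 1)
      (PySem.Set.ofList (PySem.List.pyRange 0 n 1)) []).2 = _
  rw [hofl, pv_backtrack_eq (PySem.List.pyRange 0 n 1).length _ le_rfl hpw _ [] hgood]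
  unfold all_fpf_involutions_alt
  rw [PySem.List.foldl_append_singleton_eq_map]

-- ===== VERDICT (by name: the statement is the Claim_ definition above) =====
theorem all_fpf_involutions_spec : Claim_equal_all_fpf_involutions := by
  intro n _
  unfold Spec_all_fpf_involutions
  exact pv_top n
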